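-- pv_equiv track=rewrite | github.com/rpycgo/Algorithm | BOJ/Python/Binary Search/2842.py | can_deliver
-- ===== SOURCE A (Python) =====
-- from collections import deque
--
-- def can_deliver(
--     start_x, start_y, low_limit, high_limit,
--     n_packages, N, grid, heights, dx, dy,
--     ):
--     if not (low_limit <= heights[start_x][start_y] <= high_limit):
--         return False
--
--     visited = [[False] * N for _ in range(N)]
--     visited[start_x][start_y] = True
--     n_delivered = 0
--
--     queue = deque([(start_x, start_y)])
--     while queue:
--         curr_x, curr_y = queue.popleft()
--
--         if grid[curr_x][curr_y] == 'K':
--             n_delivered += 1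
--
--         if n_delivered == n_packages:
--             return True
--
--         for i in range(8):
--             nx = curr_x + dx[i]
--             ny = curr_y + dy[i]
--
--             if 0 <= nx < N and 0 <= ny < N and not visited[nx][ny]:
--                 if low_limit <= heights[nx][ny] <= high_limit:
--                     visited[nx][ny] = True
--                     queue.append((nx, ny))
--
--     return n_delivered == n_packages
-- ===== SOURCE B (Python) =====
-- def can_deliver(start_x, start_y, low_limit, high_limit, n_packages, N, grid, heights, dx, dy):
--     if not (low_limit <= heights[start_x][start_y] <= high_limit):
--         return False
--     # Fixpoint label propagation: no queue, no stack, no frontier.  Repeatedly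
--     # sweep the whole board, propagating the reachable mark to in-band
--     # neighbours, until one full sweep changes nothing.
--     reach = [[False] * N for _ in range(N)]
--     reach[start_x][start_y] = True
--     changed = True
--     while changed:
--         changed = False
--         for x in range(N):
--             for y in range(N):
--                 if reach[x][y]:
--                     for i in range(8):
--                         nx = x + dx[i]
--                         ny = y + dy[i]
--                         if 0 <= nx < N and 0 <= ny < N and not reach[nx][ny] \
--                            and low_limit <= heights[nx][ny] <= high_limit:
--                             reach[nx][ny] = True
--                             changed = True
--     delivered = sum(1 for x in range(N) for y in range(N)
--                     if reach[x][y] and grid[x][y] == 'K')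
--     return 0 <= n_packages <= delivered
-- ===== Notes on version B (the rewrite author's own statement) =====
-- stated objective: alternative
-- what changed: A runs a deque BFS with a frontier queue, counting packages and testing for an early exit while it explores; B has no worklist at all: it computes the reachable set by dataflow-style fixpoint iteration (repeated full-board sweeps that propagate the mark to in-band neighbours until a sweep changes nothing), then counts the packages once and decides with a single comparison 0 <= n_packages <= delivered.
-- intended difference: When n_packages = 0, the start height is within [low_limit, high_limit] and the start cell holds 'K', A returns False (its counter is already 1 at its first equality check and its final test demands exact equality) while B returns True: delivering zero packages is trivially possible, so B's value is the intended one. — e.g. on can_deliver(0, 0, 0, 9, 0, 1, [["K"]], [[5]], [0, 0, 0, 0, 0, 0, 0, 0], [0, 0, 0, 0, 0, 0, 0, 0]): A returns false, B returns true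
import Mathlib
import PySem

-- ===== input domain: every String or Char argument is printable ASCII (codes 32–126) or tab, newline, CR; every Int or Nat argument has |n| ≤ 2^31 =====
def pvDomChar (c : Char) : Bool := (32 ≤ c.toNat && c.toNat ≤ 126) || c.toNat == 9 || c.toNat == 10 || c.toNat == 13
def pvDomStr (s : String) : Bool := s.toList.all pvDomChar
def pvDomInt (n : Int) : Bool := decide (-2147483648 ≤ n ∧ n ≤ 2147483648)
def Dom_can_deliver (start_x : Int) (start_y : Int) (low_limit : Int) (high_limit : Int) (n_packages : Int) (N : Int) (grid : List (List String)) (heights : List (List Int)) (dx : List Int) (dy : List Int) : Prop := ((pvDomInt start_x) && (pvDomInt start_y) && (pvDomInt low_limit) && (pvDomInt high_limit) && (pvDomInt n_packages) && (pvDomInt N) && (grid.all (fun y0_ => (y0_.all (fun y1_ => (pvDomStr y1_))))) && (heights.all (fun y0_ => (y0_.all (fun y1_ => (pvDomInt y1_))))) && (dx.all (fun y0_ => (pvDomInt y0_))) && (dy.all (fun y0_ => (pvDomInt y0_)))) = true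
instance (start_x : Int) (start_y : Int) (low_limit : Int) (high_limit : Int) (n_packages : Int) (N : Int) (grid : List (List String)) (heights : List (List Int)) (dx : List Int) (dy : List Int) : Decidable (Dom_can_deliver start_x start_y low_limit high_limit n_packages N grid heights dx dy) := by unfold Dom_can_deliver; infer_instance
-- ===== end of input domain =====

-- B replaces A's early-exit counting deque-BFS by worklist-free fixpoint iteration: repeated
-- full-board sweeps propagate the reachable mark to in-band neighbours until one sweep changes
-- nothing; packages are then counted in a single final pass.  Equivalence is about return values
-- only (A mutates nothing observable).  Intended difference on one corner is stated at D_ below.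

-- m[i][j] with Python index semantics (negative wraps); the default is returned exactly where
-- Python raises IndexError (such inputs are outside Pre_can_deliver)
def pyGet2 {α : Type} (m : List (List α)) (i j : Int) (d : α) : α :=
  match PySem.List.pyGet? m i with
  | some r => (PySem.List.pyGet? r j).getD d
  | none => d

-- boolean matrix read m[i][j] (A's visited / B's reach)
def readV (v : List (List Bool)) (i j : Int) : Bool := pyGet2 v i j false

-- m[i][j] = True; indices are nonnegative at every call site admitted by Pre_can_deliver
def setV (v : List (List Bool)) (i j : Int) : List (List Bool) :=
  v.modify i.toNat (fun r => r.set j.toNat true)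

-- ===== PORT A =====
-- body of A's 'for i in range(8)' neighbour loop
def aDir (low_limit high_limit N : Int) (heights : List (List Int)) (dx dy : List Int)
    (cx cy : Int) (vq : List (List Bool) × List (Int × Int)) (i : Nat) :
    List (List Bool) × List (Int × Int) :=
  let nx := cx + (PySem.List.pyGet? dx (i : Int)).getD 0
  let ny := cy + (PySem.List.pyGet? dy (i : Int)).getD 0
  if (0 ≤ nx ∧ nx < N ∧ 0 ≤ ny ∧ ny < N) ∧ ¬ readV vq.1 nx ny then
    if low_limit ≤ pyGet2 heights nx ny 0 ∧ pyGet2 heights nx ny 0 ≤ high_limit then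
      (setV vq.1 nx ny, vq.2 ++ [(nx, ny)])
    else vq
  else vq

def aStep (low_limit high_limit N : Int) (heights : List (List Int)) (dx dy : List Int)
    (cx cy : Int) (vq : List (List Bool) × List (Int × Int)) :
    List (List Bool) × List (Int × Int) :=
  (List.range 8).foldl (aDir low_limit high_limit N heights dx dy cx cy) vq

-- A's while loop; the fuel N*N+1 only makes the recursion structural (every queued cell was
-- freshly marked visited, so the real loop pops at most N*N+1 times and never exhausts it)
def aLoop (low_limit high_limit n_packages N : Int) (grid : List (List String))
    (heights : List (List Int)) (dx dy : List Int) :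
    Nat → List (Int × Int) → List (List Bool) → Int → Bool
  | 0, _, _, d => decide (d = n_packages)
  | _ + 1, [], _, d => decide (d = n_packages)
  | f + 1, c :: q, v, d =>
    let d' := if pyGet2 grid c.1 c.2 "" = "K" then d + 1 else d
    if d' = n_packages then true
    else
      let vq := aStep low_limit high_limit N heights dx dy c.1 c.2 (v, q)
      aLoop low_limit high_limit n_packages N grid heights dx dy f vq.2 vq.1 d'

def can_deliver (start_x : Int) (start_y : Int) (low_limit : Int) (high_limit : Int) (n_packages : Int) (N : Int) (grid : List (List String)) (heights : List (List Int)) (dx : List Int) (dy : List Int) : Bool :=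
  if low_limit ≤ pyGet2 heights start_x start_y 0 ∧ pyGet2 heights start_x start_y 0 ≤ high_limit then
    aLoop low_limit high_limit n_packages N grid heights dx dy
      (N.toNat * N.toNat + 1) [(start_x, start_y)]
      (setV (List.replicate N.toNat (List.replicate N.toNat false)) start_x start_y) 0
  else false

-- ===== PORT B =====
-- innermost 'for i in range(8)' of B's sweep: propagate the mark, record the change
def sweepDir (low_limit high_limit N : Int) (heights : List (List Int)) (dx dy : List Int)
    (x y : Int) (s : List (List Bool) × Bool) (i : Nat) : List (List Bool) × Bool :=
  let nx := x + (PySem.List.pyGet? dx (i : Int)).getD 0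
  let ny := y + (PySem.List.pyGet? dy (i : Int)).getD 0
  if (0 ≤ nx ∧ nx < N ∧ 0 ≤ ny ∧ ny < N) ∧ ¬ readV s.1 nx ny ∧
     (low_limit ≤ pyGet2 heights nx ny 0 ∧ pyGet2 heights nx ny 0 ≤ high_limit) then
    (setV s.1 nx ny, true)
  else s

-- 'if reach[x][y]: for i in range(8): ...'
def sweepCell (low_limit high_limit N : Int) (heights : List (List Int)) (dx dy : List Int)
    (s : List (List Bool) × Bool) (x y : Int) : List (List Bool) × Bool :=
  if readV s.1 x y then
    (List.range 8).foldl (sweepDir low_limit high_limit N heights dx dy x y) s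
  else s

-- 'for y in range(N): ...'
def sweepRow (low_limit high_limit N : Int) (heights : List (List Int)) (dx dy : List Int)
    (s : List (List Bool) × Bool) (x : Int) : List (List Bool) × Bool :=
  (PySem.List.pyRange 0 N 1).foldl
    (fun s y => sweepCell low_limit high_limit N heights dx dy s x y) s

-- one full sweep of the board, starting with changed = False
def sweep (low_limit high_limit N : Int) (heights : List (List Int)) (dx dy : List Int)
    (v : List (List Bool)) : List (List Bool) × Bool :=
  (PySem.List.pyRange 0 N 1).foldl (sweepRow low_limit high_limit N heights dx dy) (v, false)

-- B's 'while changed' loop; the fuel N*N+1 only makes the recursion structural (every changing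
-- sweep marks at least one fresh cell, so Python's loop runs at most N*N sweeps)
def bFix (low_limit high_limit N : Int) (heights : List (List Int)) (dx dy : List Int) :
    Nat → List (List Bool) → List (List Bool)
  | 0, v => v
  | f + 1, v =>
    let s := sweep low_limit high_limit N heights dx dy v
    if s.2 then bFix low_limit high_limit N heights dx dy f s.1 else s.1

-- 'sum(1 for x in range(N) for y in range(N) if reach[x][y] and grid[x][y] == 'K')'
def countK (N : Int) (grid : List (List String)) (reach : List (List Bool)) : Int :=
  (PySem.List.pyRange 0 N 1).foldl
    (fun acc x => (PySem.List.pyRange 0 N 1).foldl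
      (fun acc y => if readV reach x y ∧ pyGet2 grid x y "" = "K" then acc + 1 else acc) acc)
    (0 : Int)

def can_deliver_alt (start_x : Int) (start_y : Int) (low_limit : Int) (high_limit : Int) (n_packages : Int) (N : Int) (grid : List (List String)) (heights : List (List Int)) (dx : List Int) (dy : List Int) : Bool :=
  if low_limit ≤ pyGet2 heights start_x start_y 0 ∧ pyGet2 heights start_x start_y 0 ≤ high_limit then
    let reach := bFix low_limit high_limit N heights dx dy (N.toNat * N.toNat + 1)
      (setV (List.replicate N.toNat (List.replicate N.toNat false)) start_x start_y)
    let delivered := countK N grid reach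
    decide (0 ≤ n_packages) && decide (n_packages ≤ delivered)
  else false

-- ===== PRECONDITION & SPEC =====
-- Pre_ admits (a) the task's natural domain — start is a coordinate of the N×N board, the height
-- and terrain matrices have at least N rows of at least N entries, at least 8 direction offsets —
-- and (b) every input whose initial band check already fails on a readable start height (A returns
-- False there before touching anything else).  Outside Pre_, Python A raises IndexError except
-- where negative-index wraparound lets it explore from the wrapped cell (see claim.json cites).
def Pre_can_deliver (start_x : Int) (start_y : Int) (low_limit : Int) (high_limit : Int) (n_packages : Int) (N : Int) (grid : List (List String)) (heights : List (List Int)) (dx : List Int) (dy : List Int) : Prop :=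
  (0 ≤ start_x ∧ start_x < N ∧ 0 ≤ start_y ∧ start_y < N ∧
   N ≤ (heights.length : Int) ∧ (∀ r ∈ heights, N ≤ (r.length : Int)) ∧
   N ≤ (grid.length : Int) ∧ (∀ r ∈ grid, N ≤ (r.length : Int)) ∧
   8 ≤ dx.length ∧ 8 ≤ dy.length) ∨
  (((PySem.List.pyGet? heights start_x).bind (fun r => PySem.List.pyGet? r start_y)).isSome = true ∧
   ¬ (low_limit ≤ ((PySem.List.pyGet? heights start_x).bind (fun r => PySem.List.pyGet? r start_y)).getD 0 ∧
      ((PySem.List.pyGet? heights start_x).bind (fun r => PySem.List.pyGet? r start_y)).getD 0 ≤ high_limit))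
instance (start_x : Int) (start_y : Int) (low_limit : Int) (high_limit : Int) (n_packages : Int) (N : Int) (grid : List (List String)) (heights : List (List Int)) (dx : List Int) (dy : List Int) : Decidable (Pre_can_deliver start_x start_y low_limit high_limit n_packages N grid heights dx dy) := by unfold Pre_can_deliver; infer_instance

def pvWitness_can_deliver : Int × Int × Int × Int × Int × Int × List (List String) × List (List Int) × List Int × List Int :=
  (0, 0, 0, 9, 1, 1, [["K"]], [[5]], [0, 0, 0, 0, 0, 0, 0, 0], [0, 0, 0, 0, 0, 0, 0, 0])

-- Intended difference: when n_packages = 0, the start height lies in [low_limit, high_limit] and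
-- the start cell holds 'K', A returns False (its counter is already 1 at its first equality check
-- and its final test demands exact equality) while B returns True — delivering zero packages is
-- trivially possible, so B's value is the intended one.
def D_can_deliver (start_x : Int) (start_y : Int) (low_limit : Int) (high_limit : Int) (n_packages : Int) (N : Int) (grid : List (List String)) (heights : List (List Int)) (dx : List Int) (dy : List Int) : Prop :=
  n_packages = 0 ∧
  (0 ≤ start_x ∧ start_x < N ∧ 0 ≤ start_y ∧ start_y < N) ∧
  (low_limit ≤ (heights.getD start_x.toNat []).getD start_y.toNat 0 ∧
    (heights.getD start_x.toNat []).getD start_y.toNat 0 ≤ high_limit) ∧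
  (grid.getD start_x.toNat []).getD start_y.toNat "" = "K"
instance (start_x : Int) (start_y : Int) (low_limit : Int) (high_limit : Int) (n_packages : Int) (N : Int) (grid : List (List String)) (heights : List (List Int)) (dx : List Int) (dy : List Int) : Decidable (D_can_deliver start_x start_y low_limit high_limit n_packages N grid heights dx dy) := by unfold D_can_deliver; infer_instance

def Spec_can_deliver (start_x : Int) (start_y : Int) (low_limit : Int) (high_limit : Int) (n_packages : Int) (N : Int) (grid : List (List String)) (heights : List (List Int)) (dx : List Int) (dy : List Int) (out : Bool) : Prop := ¬ D_can_deliver start_x start_y low_limit high_limit n_packages N grid heights dx dy → out = can_deliver_alt start_x start_y low_limit high_limit n_packages N grid heights dx dy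
instance (start_x : Int) (start_y : Int) (low_limit : Int) (high_limit : Int) (n_packages : Int) (N : Int) (grid : List (List String)) (heights : List (List Int)) (dx : List Int) (dy : List Int) (out : Bool) : Decidable (Spec_can_deliver start_x start_y low_limit high_limit n_packages N grid heights dx dy out) := by unfold Spec_can_deliver; infer_instance

def pvDiffWitness_can_deliver : Int × Int × Int × Int × Int × Int × List (List String) × List (List Int) × List Int × List Int :=
  (0, 0, 0, 9, 0, 1, [["K"]], [[5]], [0, 0, 0, 0, 0, 0, 0, 0], [0, 0, 0, 0, 0, 0, 0, 0])
def pvDiffWitnessOut_can_deliver : Bool × Bool := (false, true)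

-- ===== CLAIM (what is proved, stated in full; the proofs are below) =====
def Claim_unchanged_can_deliver : Prop := ∀ (start_x : Int) (start_y : Int) (low_limit : Int) (high_limit : Int) (n_packages : Int) (N : Int) (grid : List (List String)) (heights : List (List Int)) (dx : List Int) (dy : List Int), Dom_can_deliver start_x start_y low_limit high_limit n_packages N grid heights dx dy → Pre_can_deliver start_x start_y low_limit high_limit n_packages N grid heights dx dy → Spec_can_deliver start_x start_y low_limit high_limit n_packages N grid heights dx dy (can_deliver start_x start_y low_limit high_limit n_packages N grid heights dx dy)
def Claim_changed_can_deliver : Prop := Dom_can_deliver (pvDiffWitness_can_deliver.1) (pvDiffWitness_can_deliver.2.1) (pvDiffWitness_can_deliver.2.2.1) (pvDiffWitness_can_deliver.2.2.2.1) (pvDiffWitness_can_deliver.2.2.2.2.1) (pvDiffWitness_can_deliver.2.2.2.2.2.1) (pvDiffWitness_can_deliver.2.2.2.2.2.2.1) (pvDiffWitness_can_deliver.2.2.2.2.2.2.2.1) (pvDiffWitness_can_deliver.2.2.2.2.2.2.2.2.1) (pvDiffWitness_can_deliver.2.2.2.2.2.2.2.2.2) ∧ Pre_can_deliver (pvDiffWitness_can_deliver.1)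 (pvDiffWitness_can_deliver.2.1) (pvDiffWitness_can_deliver.2.2.1) (pvDiffWitness_can_deliver.2.2.2.1) (pvDiffWitness_can_deliver.2.2.2.2.1) (pvDiffWitness_can_deliver.2.2.2.2.2.1) (pvDiffWitness_can_deliver.2.2.2.2.2.2.1) (pvDiffWitness_can_deliver.2.2.2.2.2.2.2.1) (pvDiffWitness_can_deliver.2.2.2.2.2.2.2.2.1) (pvDiffWitness_can_deliver.2.2.2.2.2.2.2.2.2) ∧ D_can_deliver (pvDiffWitness_can_deliver.1) (pvDiffWitness_can_deliver.2.1) (pvDiffWitness_can_deliver.2.2.1) (pvDiffWitness_can_deliver.2.2.2.1) (pvDiffWitness_can_deliver.2.2.2.2.1) (pvDiffWitness_can_deliver.2.2.2.2.2.1) (pvDiffWitness_can_deliver.2.2.2.2.2.2.1) (pvDiffWitness_can_deliver.2.2.2.2.2.2.2.1) (pvDiffWitness_can_deliver.2.2.2.2.2.2.2.2.1) (pvDiffWitness_can_deliver.2.2.2.2.2.2.2.2.2) ∧ can_deliver (pvDiffWitness_can_deliver.1) (pvDiffWitness_can_deliver.2.1) (pvDiffWitness_can_deliver.2.2.1) (pvDiffWitness_can_deliver.2.2.2.1)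 (pvDiffWitness_can_deliver.2.2.2.2.1) (pvDiffWitness_can_deliver.2.2.2.2.2.1) (pvDiffWitness_can_deliver.2.2.2.2.2.2.1) (pvDiffWitness_can_deliver.2.2.2.2.2.2.2.1) (pvDiffWitness_can_deliver.2.2.2.2.2.2.2.2.1) (pvDiffWitness_can_deliver.2.2.2.2.2.2.2.2.2) = pvDiffWitnessOut_can_deliver.1 ∧ can_deliver_alt (pvDiffWitness_can_deliver.1) (pvDiffWitness_can_deliver.2.1) (pvDiffWitness_can_deliver.2.2.1) (pvDiffWitness_can_deliver.2.2.2.1) (pvDiffWitness_can_deliver.2.2.2.2.1) (pvDiffWitness_can_deliver.2.2.2.2.2.1) (pvDiffWitness_can_deliver.2.2.2.2.2.2.1) (pvDiffWitness_can_deliver.2.2.2.2.2.2.2.1) (pvDiffWitness_can_deliver.2.2.2.2.2.2.2.2.1) (pvDiffWitness_can_deliver.2.2.2.2.2.2.2.2.2) = pvDiffWitnessOut_can_deliver.2 ∧ pvDiffWitnessOut_can_deliver.1 ≠ pvDiffWitnessOut_can_deliver.2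
def Claim_exact_can_deliver : Prop := ∀ (start_x : Int) (start_y : Int) (low_limit : Int) (high_limit : Int) (n_packages : Int) (N : Int) (grid : List (List String)) (heights : List (List Int)) (dx : List Int) (dy : List Int), Dom_can_deliver start_x start_y low_limit high_limit n_packages N grid heights dx dy → Pre_can_deliver start_x start_y low_limit high_limit n_packages N grid heights dx dy → D_can_deliver start_x start_y low_limit high_limit n_packages N grid heights dx dy → can_deliver start_x start_y low_limit high_limit n_packages N grid heights dx dy ≠ can_deliver_alt start_x start_y low_limit high_limit n_packages N grid heights dx dy

-- ===== LEMMAS AND PROOFS =====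

-- 1 if the grid holds 'K' at c, else 0 (A's per-cell increment; B's per-cell summand)
def kOf (grid : List (List String)) (c : Int × Int) : Int :=
  if pyGet2 grid c.1 c.2 "" = "K" then 1 else 0

def kSum (grid : List (List String)) (l : List (Int × Int)) : Int := (l.map (kOf grid)).sum

-- the cells A's loop pops (in order), ignoring counting and the early return
def aPops (low_limit high_limit N : Int) (heights : List (List Int)) (dx dy : List Int) :
    Nat → List (Int × Int) → List (List Bool) → List (Int × Int)
  | 0, _, _ => []
  | _ + 1, [], _ => []
  | f + 1, c :: q, v =>
    let vq := aStep low_limit high_limit N heights dx dy c.1 c.2 (v, q)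
    c :: aPops low_limit high_limit N heights dx dy f vq.2 vq.1

-- the first counter value A's loop will compare against n_packages
def firstK (grid : List (List String)) (d : Int) (f : Nat) (q : List (Int × Int)) : Int :=
  match f, q with
  | 0, _ => d
  | _ + 1, [] => d
  | _ + 1, c :: _ => d + kOf grid c

-- in-bounds board coordinate
def inbP (N : Int) (p : Int × Int) : Prop := 0 ≤ p.1 ∧ p.1 < N ∧ 0 ≤ p.2 ∧ p.2 < N

-- height within the delivery band
def bandP (low_limit high_limit : Int) (heights : List (List Int)) (p : Int × Int) : Prop :=
  low_limit ≤ pyGet2 heights p.1 p.2 0 ∧ pyGet2 heights p.1 p.2 0 ≤ high_limit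

-- the i-th neighbour offset applied to p (exactly the expression both ports compute)
def nbr (dx dy : List Int) (p : Int × Int) (i : Nat) : Int × Int :=
  (p.1 + (PySem.List.pyGet? dx (i : Int)).getD 0, p.2 + (PySem.List.pyGet? dy (i : Int)).getD 0)

-- one admissible move: some direction i < 8 into an in-bounds, in-band cell
def AdjP (low_limit high_limit N : Int) (heights : List (List Int)) (dx dy : List Int)
    (p q : Int × Int) : Prop :=
  ∃ i : Nat, i < 8 ∧ q = nbr dx dy p i ∧ inbP N q ∧ bandP low_limit high_limit heights q

-- cells reachable from the start through admissible moves (the set both programs explore)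
inductive ReachP (low_limit high_limit N : Int) (heights : List (List Int)) (dx dy : List Int)
    (s : Int × Int) : Int × Int → Prop
  | base : ReachP low_limit high_limit N heights dx dy s s
  | step {p q : Int × Int} : ReachP low_limit high_limit N heights dx dy s p →
      AdjP low_limit high_limit N heights dx dy p q →
      ReachP low_limit high_limit N heights dx dy s q

-- well-formed N×N boolean matrix
def WFV (N : Int) (v : List (List Bool)) : Prop :=
  v.length = N.toNat ∧ ∀ (i : Nat) (h : i < v.length), v[i].length = N.toNat

-- the canonical duplicate-free list of board cells
def boardCells (N : Int) : List (Int × Int) :=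
  ((List.range N.toNat).map (fun a : Nat => (a : Int))) ×ˢ ((List.range N.toNat).map (fun a : Nat => (a : Int)))

-- number of marked cells of a matrix
def countT (N : Int) (v : List (List Bool)) : Nat :=
  (boardCells N).countP (fun p => readV v p.1 p.2)

lemma pyGet2_eq {α : Type} (m : List (List α)) (x y : Int) (d : α)
    (hx0 : 0 ≤ x) (hx : x.toNat < m.length) (hy0 : 0 ≤ y) (hy : y.toNat < (m[x.toNat]).length) :
    pyGet2 m x y d = m[x.toNat][y.toNat] := by
  have hx' : x = ((x.toNat : Nat) : Int) := (Int.toNat_of_nonneg hx0).symm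
  have hy' : y = ((y.toNat : Nat) : Int) := (Int.toNat_of_nonneg hy0).symm
  unfold pyGet2
  conv_lhs => rw [hx', PySem.List.pyGet?_natCast, List.getElem?_eq_getElem hx]
  simp only []
  conv_lhs => rw [hy', PySem.List.pyGet?_natCast, List.getElem?_eq_getElem hy]
  rfl

lemma pyGet2_eq_getD {α : Type} (m : List (List α)) (x y : Int) (d : α)
    (hx0 : 0 ≤ x) (hx : x.toNat < m.length) (hy0 : 0 ≤ y) (hy : y.toNat < (m[x.toNat]).length) :
    pyGet2 m x y d = (m.getD x.toNat []).getD y.toNat d := by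
  rw [pyGet2_eq m x y d hx0 hx hy0 hy, List.getD_eq_getElem m [] hx,
    List.getD_eq_getElem _ d hy]

lemma pyGet2_eq_bind {α : Type} (m : List (List α)) (x y : Int) (d : α) :
    pyGet2 m x y d = ((PySem.List.pyGet? m x).bind (fun r => PySem.List.pyGet? r y)).getD d := by
  unfold pyGet2
  cases hm : PySem.List.pyGet? m x with
  | none => simp [hm]
  | some r =>
    cases hr : PySem.List.pyGet? r y with
    | none => simp [hm, hr]
    | some a => simp [hm, hr]

lemma length_setV (v : List (List Bool)) (i j : Int) : (setV v i j).length = v.length := by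
  simp [setV]

lemma row_length_setV (v : List (List Bool)) (i j : Int) (k : Nat) (h : k < v.length) :
    ((setV v i j)[k]'(by simpa [setV] using h)).length = (v[k]).length := by
  simp [setV, List.getElem_modify]
  split <;> simp

lemma setV_WFV (N : Int) (v : List (List Bool)) (i j : Int) (h : WFV N v) :
    WFV N (setV v i j) := by
  obtain ⟨h1, h2⟩ := h
  refine ⟨by rw [length_setV]; exact h1, ?_⟩
  intro k hk
  rw [row_length_setV v i j k (by rwa [length_setV] at hk)]
  exact h2 k (by rwa [length_setV] at hk)

lemma readV_setV (N : Int) (v : List (List Bool)) (i j x y : Int)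
    (hlen : v.length = N.toNat) (hrows : ∀ (k : Nat) (h : k < v.length), (v[k]).length = N.toNat)
    (hi0 : 0 ≤ i) (hi : i < N) (hj0 : 0 ≤ j) (hj : j < N)
    (hx0 : 0 ≤ x) (hx : x < N) (hy0 : 0 ≤ y) (hy : y < N) :
    readV (setV v i j) x y = (decide (x = i ∧ y = j) || readV v x y) := by
  have hxl : x.toNat < v.length := by omega
  have hyl : y.toNat < (v[x.toNat]).length := by rw [hrows x.toNat hxl]; omega
  have hxl' : x.toNat < (setV v i j).length := by rw [length_setV]; exact hxl
  have hyl' : y.toNat < ((setV v i j)[x.toNat]).length := by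
    rw [row_length_setV v i j x.toNat hxl]; exact hyl
  unfold readV
  rw [pyGet2_eq _ _ _ _ hx0 hxl' hy0 hyl', pyGet2_eq _ _ _ _ hx0 hxl hy0 hyl]
  simp only [setV, List.getElem_modify]
  by_cases hxi : x = i
  · by_cases hyj : y = j
    · subst hxi; subst hyj; simp
    · subst hxi
      have hyn : ¬ (y.toNat = j.toNat) := by omega
      simp [List.getElem_set, hyj]
      exact fun h => absurd h.symm hyn
  · have hxn : ¬ (i.toNat = x.toNat) := by omega
    simp [hxn, hxi]

lemma readV_setV' (N : Int) (v : List (List Bool)) (i j : Int) (p : Int × Int)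
    (hwf : WFV N v) (hij : inbP N (i, j)) (hp : inbP N p) :
    readV (setV v i j) p.1 p.2 = (decide (p = (i, j)) || readV v p.1 p.2) := by
  obtain ⟨h1, h2⟩ := hwf
  obtain ⟨a1, a2, a3, a4⟩ := hij
  obtain ⟨b1, b2, b3, b4⟩ := hp
  rw [readV_setV N v i j p.1 p.2 h1 h2 a1 a2 a3 a4 b1 b2 b3 b4]
  congr 1
  rw [decide_eq_decide]
  constructor
  · rintro ⟨h, h'⟩; exact Prod.ext h h'
  · intro h; exact ⟨congrArg Prod.fst h, congrArg Prod.snd h⟩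

lemma init_WFV (N sx sy : Int) :
    WFV N (setV (List.replicate N.toNat (List.replicate N.toNat false)) sx sy) := by
  refine setV_WFV N _ sx sy ⟨by simp, ?_⟩
  intro k h; simp

lemma readV_init (N sx sy : Int) (p : Int × Int)
    (hs : inbP N (sx, sy)) (hp : inbP N p) :
    readV (setV (List.replicate N.toNat (List.replicate N.toNat false)) sx sy) p.1 p.2 =
      decide (p = (sx, sy)) := by
  rw [readV_setV' N _ sx sy p ⟨by simp, by intro k h; simp⟩ hs hp]
  have hbase : readV (List.replicate N.toNat (List.replicate N.toNat false)) p.1 p.2 = false := by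
    obtain ⟨b1, b2, b3, b4⟩ := hp
    unfold readV
    rw [pyGet2_eq _ _ _ _ b1 (by simp; omega) b3 (by simp; omega)]
    simp
  rw [hbase, Bool.or_false]

lemma mem_range_cast (N : Int) (x : Int) :
    x ∈ (List.range N.toNat).map (fun a : Nat => (a : Int)) ↔ 0 ≤ x ∧ x < N := by
  simp only [List.mem_map, List.mem_range]
  constructor
  · rintro ⟨a, ha, rfl⟩; omega
  · rintro ⟨h1, h2⟩; exact ⟨x.toNat, by omega, by omega⟩

lemma mem_boardCells (N : Int) (p : Int × Int) : p ∈ boardCells N ↔ inbP N p := by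
  obtain ⟨x, y⟩ := p
  unfold boardCells inbP
  rw [List.mem_product, mem_range_cast, mem_range_cast]
  tauto

lemma nodup_range_cast (N : Int) : ((List.range N.toNat).map (fun a : Nat => (a : Int))).Nodup :=
  List.nodup_range.map (fun a a' h => by exact_mod_cast h)

lemma nodup_boardCells (N : Int) : (boardCells N).Nodup :=
  (nodup_range_cast N).product (nodup_range_cast N)

lemma length_boardCells (N : Int) : (boardCells N).length = N.toNat * N.toNat := by
  unfold boardCells
  rw [List.length_product]
  simp

lemma len_le_board (N : Int) (l : List (Int × Int)) (hnd : l.Nodup)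
    (hin : ∀ p ∈ l, inbP N p) : l.length ≤ N.toNat * N.toNat := by
  have hsub : l ⊆ boardCells N := fun p hp => (mem_boardCells N p).mpr (hin p hp)
  have := (List.subperm_of_subset hnd hsub).length_le
  rwa [length_boardCells N] at this

lemma kOf_bounds (grid : List (List String)) (c : Int × Int) :
    0 ≤ kOf grid c ∧ kOf grid c ≤ 1 := by
  unfold kOf; split <;> omega

lemma kSum_nonneg (grid : List (List String)) (l : List (Int × Int)) : 0 ≤ kSum grid l := by
  refine List.sum_nonneg ?_
  intro x hx
  obtain ⟨c, _, rfl⟩ := List.mem_map.mp hx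
  exact (kOf_bounds grid c).1

lemma kSum_cons (grid : List (List String)) (c : Int × Int) (l : List (Int × Int)) :
    kSum grid (c :: l) = kOf grid c + kSum grid l := by
  simp [kSum]

lemma kSum_perm (grid : List (List String)) (l l' : List (Int × Int)) (h : l.Perm l') :
    kSum grid l = kSum grid l' := by
  unfold kSum
  exact (h.map (kOf grid)).sum_eq

lemma firstK_bounds (grid : List (List String)) (d : Int) (f : Nat) (q : List (Int × Int)) :
    d ≤ firstK grid d f q ∧ firstK grid d f q ≤ d + 1 := by
  unfold firstK
  rcases f with _ | f <;> rcases q with _ | ⟨c, q⟩ <;> simp <;>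
    have := kOf_bounds grid c <;> omega

-- A's loop returns True exactly when n_packages lies between its first checked counter value
-- and the total number of 'K' cells it would ever pop
lemma aLoop_char (low_limit high_limit n_packages N : Int) (grid : List (List String))
    (heights : List (List Int)) (dx dy : List Int) :
    ∀ (f : Nat) (q : List (Int × Int)) (v : List (List Bool)) (d : Int),
      aLoop low_limit high_limit n_packages N grid heights dx dy f q v d =
        decide (firstK grid d f q ≤ n_packages ∧
          n_packages ≤ d + kSum grid (aPops low_limit high_limit N heights dx dy f q v)) := by
  intro f
  induction f with
  | zero =>
    intro q v d
    show decide (d = n_packages) = _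
    rw [decide_eq_decide]
    simp only [firstK, aPops, kSum, List.map_nil, List.sum_nil]
    omega
  | succ f ih =>
    intro q v d
    cases q with
    | nil =>
      show decide (d = n_packages) = _
      rw [decide_eq_decide]
      simp only [firstK, aPops, kSum, List.map_nil, List.sum_nil]
      omega
    | cons c q =>
      simp only [aLoop, aPops, firstK]
      rw [ih]
      have hd' : (if pyGet2 grid c.1 c.2 "" = "K" then d + 1 else d) = d + kOf grid c := by
        unfold kOf; split <;> omega
      simp only [hd', kSum_cons]
      have hS := kSum_nonneg grid (aPops low_limit high_limit N heights dx dy f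
        (aStep low_limit high_limit N heights dx dy c.1 c.2 (v, q)).2
        (aStep low_limit high_limit N heights dx dy c.1 c.2 (v, q)).1)
      have hF := firstK_bounds grid (d + kOf grid c) f
        (aStep low_limit high_limit N heights dx dy c.1 c.2 (v, q)).2
      have hk := kOf_bounds grid c
      split_ifs with h
      · rw [eq_comm, decide_eq_true_iff]
        omega
      · rw [decide_eq_decide]
        omega

-- one direction step of A: it appends at most one fresh, in-bounds, in-band neighbour of c,
-- marks exactly that cell, and afterwards the i-th neighbour (if admissible) is visited
lemma aDir_spec (low_limit high_limit N : Int) (heights : List (List Int)) (dx dy : List Int)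
    (cx cy : Int) (i : Nat) (v : List (List Bool)) (qa : List (Int × Int)) (hwf : WFV N v) :
    ∃ t : List (Int × Int),
      (aDir low_limit high_limit N heights dx dy cx cy (v, qa) i).2 = qa ++ t ∧
      WFV N (aDir low_limit high_limit N heights dx dy cx cy (v, qa) i).1 ∧
      (∀ p, inbP N p → ((readV (aDir low_limit high_limit N heights dx dy cx cy (v, qa) i).1 p.1 p.2 = true) ↔
        (readV v p.1 p.2 = true ∨ p ∈ t))) ∧
      t.Nodup ∧
      (∀ p ∈ t, readV v p.1 p.2 = false ∧ inbP N p ∧ p = nbr dx dy (cx, cy) i ∧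
        bandP low_limit high_limit heights p) ∧
      (inbP N (nbr dx dy (cx, cy) i) → bandP low_limit high_limit heights (nbr dx dy (cx, cy) i) →
        readV (aDir low_limit high_limit N heights dx dy cx cy (v, qa) i).1
          (nbr dx dy (cx, cy) i).1 (nbr dx dy (cx, cy) i).2 = true) := by
  have hnbr : nbr dx dy (cx, cy) i =
      (cx + (PySem.List.pyGet? dx (i : Int)).getD 0, cy + (PySem.List.pyGet? dy (i : Int)).getD 0) := rfl
  simp only [aDir, hnbr]
  set nx := cx + (PySem.List.pyGet? dx (i : Int)).getD 0 with hnx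
  set ny := cy + (PySem.List.pyGet? dy (i : Int)).getD 0 with hny
  by_cases h1 : (0 ≤ nx ∧ nx < N ∧ 0 ≤ ny ∧ ny < N) ∧ ¬ readV v nx ny = true
  · by_cases h2 : low_limit ≤ pyGet2 heights nx ny 0 ∧ pyGet2 heights nx ny 0 ≤ high_limit
    · rw [if_pos h1, if_pos h2]
      have hinb : inbP N (nx, ny) := h1.1
      refine ⟨[(nx, ny)], rfl, setV_WFV N v nx ny hwf, ?_, List.nodup_singleton _, ?_, ?_⟩
      · intro p hp
        rw [readV_setV' N v nx ny p hwf hinb hp]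
        simp only [Bool.or_eq_true, decide_eq_true_eq, List.mem_singleton]
        tauto
      · intro p hp
        rw [List.mem_singleton] at hp
        subst hp
        exact ⟨Bool.not_eq_true _ ▸ (by simpa using h1.2), hinb, rfl, h2⟩
      · intro _ _
        rw [readV_setV' N v nx ny (nx, ny) hwf hinb hinb]
        simp
    · rw [if_pos h1, if_neg h2]
      refine ⟨[], by simp, hwf, by simp, List.nodup_nil, by simp, ?_⟩
      intro _ hband
      unfold bandP at hband
      exact absurd hband h2
  · rw [if_neg h1]
    refine ⟨[], by simp, hwf, by simp, List.nodup_nil, by simp, ?_⟩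
    intro hinb hband
    unfold inbP at hinb
    simp only [not_and, not_not] at h1
    exact h1 ⟨hinb.1, hinb.2.1, hinb.2.2.1, hinb.2.2.2⟩

-- folding A's direction step over a set of directions: the queue grows by a duplicate-free
-- list of fresh admissible neighbours of c, exactly those become newly visited, and every
-- admissible neighbour in a processed direction ends up visited
lemma aFold_spec (low_limit high_limit N : Int) (heights : List (List Int)) (dx dy : List Int)
    (c : Int × Int) :
    ∀ (is : List Nat), (∀ i ∈ is, i < 8) → ∀ (v : List (List Bool)) (qa : List (Int × Int)),
      WFV N v →
      ∃ t : List (Int × Int),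
        (is.foldl (aDir low_limit high_limit N heights dx dy c.1 c.2) (v, qa)).2 = qa ++ t ∧
        WFV N (is.foldl (aDir low_limit high_limit N heights dx dy c.1 c.2) (v, qa)).1 ∧
        (∀ p, inbP N p → ((readV (is.foldl (aDir low_limit high_limit N heights dx dy c.1 c.2) (v, qa)).1 p.1 p.2 = true) ↔
          (readV v p.1 p.2 = true ∨ p ∈ t))) ∧
        t.Nodup ∧
        (∀ p ∈ t, readV v p.1 p.2 = false ∧ inbP N p ∧
          AdjP low_limit high_limit N heights dx dy c p) ∧
        (∀ i ∈ is, inbP N (nbr dx dy c i) → bandP low_limit high_limit heights (nbr dx dy c i) →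
          readV (is.foldl (aDir low_limit high_limit N heights dx dy c.1 c.2) (v, qa)).1
            (nbr dx dy c i).1 (nbr dx dy c i).2 = true) := by
  intro is
  induction is with
  | nil =>
    intro _ v qa hwf
    exact ⟨[], by simp, hwf, by simp, List.nodup_nil, by simp, by simp⟩
  | cons i is ih =>
    intro h8 v qa hwf
    obtain ⟨t₁, hq₁, hwf₁, hiff₁, hnd₁, hmem₁, hcl₁⟩ :=
      aDir_spec low_limit high_limit N heights dx dy c.1 c.2 i v qa hwf
    simp only [List.foldl_cons]
    rw [show aDir low_limit high_limit N heights dx dy c.1 c.2 (v, qa) i =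
        ((aDir low_limit high_limit N heights dx dy c.1 c.2 (v, qa) i).1,
         (aDir low_limit high_limit N heights dx dy c.1 c.2 (v, qa) i).2) from rfl, hq₁]
    obtain ⟨t₂, hq₂, hwf₂, hiff₂, hnd₂, hmem₂, hcl₂⟩ :=
      ih (fun j hj => h8 j (List.mem_cons_of_mem i hj)) _ (qa ++ t₁) hwf₁
    refine ⟨t₁ ++ t₂, by rw [hq₂, List.append_assoc], hwf₂, ?_, ?_, ?_, ?_⟩
    · intro p hp
      rw [hiff₂ p hp, hiff₁ p hp, List.mem_append]
      tauto
    · rw [List.nodup_append]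
      refine ⟨hnd₁, hnd₂, ?_⟩
      intro p hp₁ p' hp₂ heq
      subst heq
      have hinb := (hmem₁ p hp₁).2.1
      have htrue := (hiff₁ p hinb).mpr (Or.inr hp₁)
      have hfalse := (hmem₂ p hp₂).1
      rw [htrue] at hfalse
      exact absurd hfalse (by simp)
    · intro p hp
      rw [List.mem_append] at hp
      rcases hp with hp | hp
      · obtain ⟨hf, hinb, heq, hband⟩ := hmem₁ p hp
        exact ⟨hf, hinb, ⟨i, h8 i List.mem_cons_self, heq, heq ▸ hinb, heq ▸ hband⟩⟩
      · obtain ⟨hf, hinb, hadj⟩ := hmem₂ p hp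
        refine ⟨?_, hinb, hadj⟩
        by_contra hv
        have : readV v p.1 p.2 = true := by
          cases hr : readV v p.1 p.2
          · exact absurd hr hv
          · rfl
        exact absurd ((hiff₁ p hinb).mpr (Or.inl this)) (by simp [hf])
    · intro j hj hinb hband
      rcases List.mem_cons.mp hj with rfl | hj
      · have := hcl₁ hinb hband
        exact (hiff₂ _ hinb).mpr (Or.inl this)
      · exact hcl₂ j hj hinb hband

-- BFS invariant: given visited = popped ∪ queue (duplicate-free, sound, neighbours of popped
-- cells visited) and enough fuel, the completed pop list is duplicate-free, sound for ReachP,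
-- closed under admissible moves, and absorbs the queue
lemma aPops_spec (low_limit high_limit N : Int) (heights : List (List Int)) (dx dy : List Int)
    (s : Int × Int) :
    ∀ (f : Nat) (q popped : List (Int × Int)) (v : List (List Bool)),
      WFV N v →
      (∀ p, inbP N p → (readV v p.1 p.2 = true ↔ p ∈ popped ∨ p ∈ q)) →
      (popped ++ q).Nodup →
      (∀ p ∈ popped ++ q, inbP N p ∧ ReachP low_limit high_limit N heights dx dy s p) →
      (∀ p ∈ popped, ∀ p', AdjP low_limit high_limit N heights dx dy p p' →
        p' ∈ popped ∨ p' ∈ q) →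
      N.toNat * N.toNat + 1 ≤ popped.length + f →
      (popped ++ aPops low_limit high_limit N heights dx dy f q v).Nodup ∧
      (∀ p ∈ popped ++ aPops low_limit high_limit N heights dx dy f q v,
        inbP N p ∧ ReachP low_limit high_limit N heights dx dy s p) ∧
      (∀ p ∈ popped ++ aPops low_limit high_limit N heights dx dy f q v,
        ∀ p', AdjP low_limit high_limit N heights dx dy p p' →
          p' ∈ popped ++ aPops low_limit high_limit N heights dx dy f q v) ∧
      (∀ p ∈ q, p ∈ popped ++ aPops low_limit high_limit N heights dx dy f q v) := by
  intro f
  induction f with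
  | zero =>
    intro q popped v _ _ hnd hin _ hfuel
    exfalso
    have hlen : popped.length ≤ N.toNat * N.toNat :=
      len_le_board N popped (hnd.of_append_left) (fun p hp => (hin p (List.mem_append_left q hp)).1)
    omega
  | succ f ih =>
    intro q popped v hwf hiff hnd hin hcl hfuel
    cases q with
    | nil =>
      simp only [aPops, List.append_nil]
      refine ⟨by simpa using hnd, by simpa using hin, ?_, by simp⟩
      intro p hp p' hadj
      rcases hcl p (by simpa using hp) p' hadj with h | h
      · simpa using h
      · simp at h
    | cons c q' =>
      simp only [aPops]
      obtain ⟨t, hq, hwf₁, hiff₁, hndt, hmemt, hclt⟩ :=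
        aFold_spec low_limit high_limit N heights dx dy c (List.range 8)
          (fun j hj => List.mem_range.mp hj) v q' hwf
      -- the fresh cells are not among popped ++ c :: q'
      have hfresh : ∀ p ∈ t, ¬ (p ∈ popped ∨ p ∈ c :: q') := by
        intro p hp hmem
        have h₁ := (hmemt p hp).1
        have := (hiff p (hmemt p hp).2.1).mpr hmem
        rw [this] at h₁
        exact absurd h₁ (by simp)
      have hmemc : c ∈ popped ++ c :: q' := List.mem_append_right _ List.mem_cons_self
      have happ : (popped ++ [c]) ++ (q' ++ t) = (popped ++ c :: q') ++ t := by
        simp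
      have hq' : (aStep low_limit high_limit N heights dx dy c.1 c.2 (v, q')).2 = q' ++ t := hq
      rw [hq']
      have hres := ih (q' ++ t) (popped ++ [c])
        (aStep low_limit high_limit N heights dx dy c.1 c.2 (v, q')).1 hwf₁
        (by
          intro p hp
          rw [show (aStep low_limit high_limit N heights dx dy c.1 c.2 (v, q')).1 =
            ((List.range 8).foldl (aDir low_limit high_limit N heights dx dy c.1 c.2) (v, q')).1 from rfl]
          rw [hiff₁ p hp, hiff p hp]
          simp only [List.mem_append, List.mem_cons, List.mem_singleton]
          tauto)
        (by
          rw [happ, List.nodup_append]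
          refine ⟨by simpa using hnd, hndt, ?_⟩
          intro p hp p' hp' heq
          subst heq
          exact hfresh p hp' (by simpa using hp))
        (by
          intro p hp
          rw [happ, List.mem_append] at hp
          rcases hp with hp | hp
          · exact hin p hp
          · obtain ⟨hf, hinb, hadj⟩ := hmemt p hp
            exact ⟨hinb, ReachP.step (hin c hmemc).2 hadj⟩)
        (by
          intro p hp p' hadj
          rw [List.mem_append, List.mem_singleton] at hp
          have hinb' : inbP N p' := by
            obtain ⟨i, _, rfl, hinb', _⟩ := hadj
            exact hinb'
          rcases hp with hp | rfl
          · rcases hcl p hp p' hadj with h | h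
            · exact Or.inl (List.mem_append_left _ h)
            · rcases List.mem_cons.mp h with rfl | h
              · exact Or.inl (List.mem_append_right _ (List.mem_singleton_self _))
              · exact Or.inr (List.mem_append_left _ h)
          · obtain ⟨i, hi8, rfl, hinb, hband⟩ := hadj
            have := hclt i (List.mem_range.mpr hi8) hinb hband
            have hmem := (hiff₁ _ hinb).mp this
            rcases hmem with h | h
            · rcases (hiff _ hinb).mp h with h | h
              · exact Or.inl (List.mem_append_left _ h)
              · rcases List.mem_cons.mp h with heq | h
                · exact Or.inl (by rw [heq]; exact List.mem_append_right _ (List.mem_singleton_self _))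
                · exact Or.inr (List.mem_append_left _ h)
            · exact Or.inr (List.mem_append_right _ h))
        (by simp only [List.length_append, List.length_singleton]; omega)
      obtain ⟨hnd', hin', hcl', habs'⟩ := hres
      have hform : popped ++ c :: aPops low_limit high_limit N heights dx dy f (q' ++ t)
          (aStep low_limit high_limit N heights dx dy c.1 c.2 (v, q')).1 =
          (popped ++ [c]) ++ aPops low_limit high_limit N heights dx dy f (q' ++ t)
          (aStep low_limit high_limit N heights dx dy c.1 c.2 (v, q')).1 := by
        simp
      rw [hform]
      refine ⟨hnd', hin', hcl', ?_⟩
      intro p hp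
      rcases List.mem_cons.mp hp with rfl | hp
      · exact List.mem_append_left _ (List.mem_append_right _ (List.mem_singleton_self _))
      · exact habs' p (List.mem_append_left _ hp)

-- A pops exactly the reachable cells, each once
lemma aPops_char (low_limit high_limit N : Int) (heights : List (List Int)) (dx dy : List Int)
    (sx sy : Int) (hs : inbP N (sx, sy)) :
    (aPops low_limit high_limit N heights dx dy (N.toNat * N.toNat + 1) [(sx, sy)]
      (setV (List.replicate N.toNat (List.replicate N.toNat false)) sx sy)).Nodup ∧
    (∀ p, p ∈ aPops low_limit high_limit N heights dx dy (N.toNat * N.toNat + 1) [(sx, sy)]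
      (setV (List.replicate N.toNat (List.replicate N.toNat false)) sx sy) ↔
      ReachP low_limit high_limit N heights dx dy (sx, sy) p) := by
  have hres := aPops_spec low_limit high_limit N heights dx dy (sx, sy)
    (N.toNat * N.toNat + 1) [(sx, sy)] []
    (setV (List.replicate N.toNat (List.replicate N.toNat false)) sx sy)
    (init_WFV N sx sy)
    (by
      intro p hp
      rw [readV_init N sx sy p hs hp]
      simp)
    (by simp)
    (by
      intro p hp
      simp only [List.nil_append, List.mem_singleton] at hp
      subst hp
      exact ⟨hs, ReachP.base⟩)
    (by simp)
    (by simp)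
  simp only [List.nil_append] at hres
  obtain ⟨hnd, hin, hcl, habs⟩ := hres
  refine ⟨hnd, ?_⟩
  intro p
  constructor
  · intro hp
    exact (hin p hp).2
  · intro hr
    induction hr with
    | base => exact habs (sx, sy) (List.mem_singleton_self _)
    | step hr hadj ih => exact hcl _ ih _ hadj

-- a fold whose step never resets a true change flag keeps it true
lemma foldl_true {α σ : Type} (g : σ × Bool → α → σ × Bool)
    (hstick : ∀ s a, s.2 = true → (g s a).2 = true) :
    ∀ (L : List α) (s : σ × Bool), s.2 = true → (L.foldl g s).2 = true := by
  intro L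
  induction L with
  | nil => intro s h; exact h
  | cons a L ih => intro s h; exact ih (g s a) (hstick s a h)

-- if additionally a step with false flag that keeps it false is the identity, then a fold that
-- ends with the flag false did nothing at all, and every step fixed the start state
lemma foldl_stable {α σ : Type} (g : σ × Bool → α → σ × Bool)
    (hstick : ∀ s a, s.2 = true → (g s a).2 = true)
    (hfalse : ∀ s a, (g s a).2 = false → g s a = s) :
    ∀ (L : List α) (s : σ × Bool), (L.foldl g s).2 = false →
      L.foldl g s = s ∧ ∀ a ∈ L, g s a = s := by
  intro L
  induction L with
  | nil => intro s _; exact ⟨rfl, by simp⟩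
  | cons a L ih =>
    intro s h
    rw [List.foldl_cons] at h ⊢
    have hflag : (g s a).2 = false := by
      cases hf : (g s a).2
      · rfl
      · rw [foldl_true g hstick L (g s a) hf] at h; exact h
    have heq : g s a = s := hfalse _ _ hflag
    rw [heq] at h ⊢
    obtain ⟨h1, h2⟩ := ih s h
    refine ⟨h1, ?_⟩
    intro b hb
    rcases List.mem_cons.mp hb with rfl | hb
    · exact heq
    · exact h2 b hb

lemma sweepDir_stick (low_limit high_limit N : Int) (heights : List (List Int)) (dx dy : List Int)
    (x y : Int) (s : List (List Bool) × Bool) (i : Nat) (h : s.2 = true) :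
    (sweepDir low_limit high_limit N heights dx dy x y s i).2 = true := by
  simp only [sweepDir]
  split
  · rfl
  · exact h

lemma sweepDir_false (low_limit high_limit N : Int) (heights : List (List Int)) (dx dy : List Int)
    (x y : Int) (s : List (List Bool) × Bool) (i : Nat)
    (h : (sweepDir low_limit high_limit N heights dx dy x y s i).2 = false) :
    sweepDir low_limit high_limit N heights dx dy x y s i = s := by
  simp only [sweepDir] at h ⊢
  split at h
  · exact absurd h (by simp)
  · rename_i hc
    rw [if_neg hc]

lemma sweepCell_stick (low_limit high_limit N : Int) (heights : List (List Int)) (dx dy : List Int)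
    (s : List (List Bool) × Bool) (x y : Int) (h : s.2 = true) :
    (sweepCell low_limit high_limit N heights dx dy s x y).2 = true := by
  unfold sweepCell
  split
  · exact foldl_true _ (sweepDir_stick low_limit high_limit N heights dx dy x y) _ s h
  · exact h

lemma sweepCell_false (low_limit high_limit N : Int) (heights : List (List Int)) (dx dy : List Int)
    (s : List (List Bool) × Bool) (x y : Int)
    (h : (sweepCell low_limit high_limit N heights dx dy s x y).2 = false) :
    sweepCell low_limit high_limit N heights dx dy s x y = s := by
  unfold sweepCell at h ⊢
  split at h <;> split
  · exact (foldl_stable _ (sweepDir_stick low_limit high_limit N heights dx dy x y)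
      (sweepDir_false low_limit high_limit N heights dx dy x y) _ s h).1
  all_goals first | rfl | simp_all

lemma sweepRow_stick (low_limit high_limit N : Int) (heights : List (List Int)) (dx dy : List Int)
    (s : List (List Bool) × Bool) (x : Int) (h : s.2 = true) :
    (sweepRow low_limit high_limit N heights dx dy s x).2 = true := by
  unfold sweepRow
  exact foldl_true _ (fun s y hs => sweepCell_stick low_limit high_limit N heights dx dy s x y hs)
    _ s h

lemma sweepRow_false (low_limit high_limit N : Int) (heights : List (List Int)) (dx dy : List Int)
    (s : List (List Bool) × Bool) (x : Int)
    (h : (sweepRow low_limit high_limit N heights dx dy s x).2 = false) :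
    sweepRow low_limit high_limit N heights dx dy s x = s := by
  unfold sweepRow at h ⊢
  exact (foldl_stable _ (fun s y hs => sweepCell_stick low_limit high_limit N heights dx dy s x y hs)
    (fun s y hs => sweepCell_false low_limit high_limit N heights dx dy s x y hs) _ s h).1

-- a sweep that reports no change changed nothing and witnesses closure of the marked set
lemma sweep_stable (low_limit high_limit N : Int) (heights : List (List Int)) (dx dy : List Int)
    (v : List (List Bool)) (h : (sweep low_limit high_limit N heights dx dy v).2 = false) :
    (sweep low_limit high_limit N heights dx dy v).1 = v ∧
    ∀ p, inbP N p → readV v p.1 p.2 = true →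
      ∀ p', AdjP low_limit high_limit N heights dx dy p p' → readV v p'.1 p'.2 = true := by
  unfold sweep at h ⊢
  obtain ⟨h1, h2⟩ := foldl_stable _
    (fun s x hs => sweepRow_stick low_limit high_limit N heights dx dy s x hs)
    (fun s x hs => sweepRow_false low_limit high_limit N heights dx dy s x hs)
    (PySem.List.pyRange 0 N 1) (v, false) h
  refine ⟨by rw [h1], ?_⟩
  intro p hp hv p' hadj
  obtain ⟨i, hi8, rfl, hinb', hband'⟩ := hadj
  have hx : p.1 ∈ PySem.List.pyRange 0 N 1 :=
    (PySem.List.mem_pyRange_one).mpr ⟨hp.1, hp.2.1⟩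
  have hrow := h2 p.1 hx
  have hrow2 : (sweepRow low_limit high_limit N heights dx dy (v, false) p.1).2 = false := by
    rw [hrow]
  unfold sweepRow at hrow
  obtain ⟨_, h3⟩ := foldl_stable _
    (fun s y hs => sweepCell_stick low_limit high_limit N heights dx dy s p.1 y hs)
    (fun s y hs => sweepCell_false low_limit high_limit N heights dx dy s p.1 y hs)
    (PySem.List.pyRange 0 N 1) (v, false) (by unfold sweepRow at hrow2; rw [hrow2])
  have hy : p.2 ∈ PySem.List.pyRange 0 N 1 :=
    (PySem.List.mem_pyRange_one).mpr ⟨hp.2.2.1, hp.2.2.2⟩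
  have hcell := h3 p.2 hy
  unfold sweepCell at hcell
  rw [if_pos (by exact hv)] at hcell
  obtain ⟨_, h4⟩ := foldl_stable _
    (sweepDir_stick low_limit high_limit N heights dx dy p.1 p.2)
    (sweepDir_false low_limit high_limit N heights dx dy p.1 p.2)
    (List.range 8) (v, false) (by rw [hcell])
  have hdir := h4 i (List.mem_range.mpr hi8)
  simp only [sweepDir] at hdir
  split at hdir
  · exact absurd (congrArg Prod.snd hdir) (by simp)
  · rename_i hneg
    by_contra hrv
    unfold inbP at hinb'
    unfold bandP at hband'
    exact hneg ⟨⟨hinb'.1, hinb'.2.1, hinb'.2.2.1, hinb'.2.2.2⟩, hrv, hband'⟩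

-- fold preserves an invariant preserved by each step
lemma foldl_pres {α σ : Type} (P : σ → Prop) (g : σ → α → σ) :
    ∀ (L : List α), (∀ s a, a ∈ L → P s → P (g s a)) → ∀ s, P s → P (L.foldl g s) := by
  intro L
  induction L with
  | nil => intro _ s h; exact h
  | cons a L ih =>
    intro hstep s h
    exact ih (fun s b hb => hstep s b (List.mem_cons_of_mem a hb)) (g s a)
      (hstep s a List.mem_cons_self h)

lemma countP_flip {α : Type} [DecidableEq α] (a : α) (f g : α → Bool) :
    ∀ (l : List α), l.Nodup → a ∈ l → f a = false → g a = true →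
      (∀ b ∈ l, b ≠ a → g b = f b) → l.countP g = l.countP f + 1 := by
  intro l
  induction l with
  | nil => intro _ h; simp at h
  | cons c l ih =>
    intro hnd hmem hf hg hagree
    rcases List.mem_cons.mp hmem with rfl | hmem
    · have hnotin : a ∉ l := (List.nodup_cons.mp hnd).1
      have : l.countP g = l.countP f := by
        apply List.countP_congr
        intro b hb
        rw [hagree b (List.mem_cons_of_mem a hb) (fun h => hnotin (h ▸ hb))]
      simp [List.countP_cons, hf, hg, this]
    · have hne : c ≠ a := fun h => (List.nodup_cons.mp hnd).1 (h ▸ hmem)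
      have hc := hagree c List.mem_cons_self hne
      have := ih (List.nodup_cons.mp hnd).2 hmem hf hg
        (fun b hb => hagree b (List.mem_cons_of_mem c hb))
      simp [List.countP_cons, hc, this]
      omega

lemma countT_set (N : Int) (v : List (List Bool)) (x y : Int)
    (hwf : WFV N v) (hinb : inbP N (x, y)) (hfresh : readV v x y = false) :
    countT N (setV v x y) = countT N v + 1 := by
  unfold countT
  apply countP_flip (x, y) _ _ (boardCells N) (nodup_boardCells N)
    ((mem_boardCells N (x, y)).mpr hinb)
  · exact hfresh
  · rw [readV_setV' N v x y (x, y) hwf hinb hinb]; simp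
  · intro b hb hne
    rw [readV_setV' N v x y b hwf hinb ((mem_boardCells N b).mp hb)]
    simp [hne]

lemma countT_le (N : Int) (v : List (List Bool)) : countT N v ≤ N.toNat * N.toNat := by
  unfold countT
  calc (boardCells N).countP _ ≤ (boardCells N).length := List.countP_le_length
  _ = N.toNat * N.toNat := length_boardCells N

-- invariant of B's sweep relative to its input matrix v: well-formed, grows pointwise,
-- sound for ReachP, and a raised change flag certifies a strictly larger marked count
def Qb (low_limit high_limit N : Int) (heights : List (List Int)) (dx dy : List Int)
    (s : Int × Int) (v : List (List Bool)) (st : List (List Bool) × Bool) : Prop :=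
  WFV N st.1 ∧
  (∀ p, inbP N p → readV v p.1 p.2 = true → readV st.1 p.1 p.2 = true) ∧
  (∀ p, inbP N p → readV st.1 p.1 p.2 = true →
    ReachP low_limit high_limit N heights dx dy s p) ∧
  countT N v ≤ countT N st.1 ∧
  (st.2 = true → countT N v + 1 ≤ countT N st.1)

lemma sweepDir_pres (low_limit high_limit N : Int) (heights : List (List Int)) (dx dy : List Int)
    (s : Int × Int) (v : List (List Bool)) (x y : Int) (i : Nat) (st : List (List Bool) × Bool)
    (hi8 : i < 8) (hxy : inbP N (x, y))
    (hq : Qb low_limit high_limit N heights dx dy s v st) (hr : readV st.1 x y = true) :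
    Qb low_limit high_limit N heights dx dy s v
      (sweepDir low_limit high_limit N heights dx dy x y st i) ∧
    readV (sweepDir low_limit high_limit N heights dx dy x y st i).1 x y = true := by
  obtain ⟨hwf, hmono, hsound, hc1, hc2⟩ := hq
  simp only [sweepDir]
  split
  · rename_i hg
    unfold Qb
    dsimp only
    obtain ⟨hb, hfresh, hband⟩ := hg
    have hinb : inbP N (x + (PySem.List.pyGet? dx (i : Int)).getD 0,
        y + (PySem.List.pyGet? dy (i : Int)).getD 0) := hb
    have hfresh' : readV st.1 (x + (PySem.List.pyGet? dx (i : Int)).getD 0)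
        (y + (PySem.List.pyGet? dy (i : Int)).getD 0) = false := by
      cases hrr : readV st.1 (x + (PySem.List.pyGet? dx (i : Int)).getD 0)
        (y + (PySem.List.pyGet? dy (i : Int)).getD 0)
      · rfl
      · exact absurd hrr hfresh
    have hcount := countT_set N st.1 _ _ hwf hinb hfresh'
    have hreachxy := hsound (x, y) hxy hr
    refine ⟨⟨setV_WFV N st.1 _ _ hwf, ?_, ?_, by omega, by intro _; omega⟩, ?_⟩
    · intro p hp hv
      rw [readV_setV' N st.1 _ _ p hwf hinb hp]
      simp [hmono p hp hv]
    · intro p hp hv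
      rw [readV_setV' N st.1 _ _ p hwf hinb hp] at hv
      simp only [Bool.or_eq_true, decide_eq_true_eq] at hv
      rcases hv with rfl | hv
      · exact ReachP.step hreachxy ⟨i, hi8, rfl, hinb, hband⟩
      · exact hsound p hp hv
    · rw [readV_setV' N st.1 _ _ (x, y) hwf hinb hxy]
      simp [hr]
  · exact ⟨⟨hwf, hmono, hsound, hc1, hc2⟩, hr⟩

lemma sweepCell_pres (low_limit high_limit N : Int) (heights : List (List Int)) (dx dy : List Int)
    (s : Int × Int) (v : List (List Bool)) (st : List (List Bool) × Bool) (x y : Int)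
    (hxy : inbP N (x, y)) (hq : Qb low_limit high_limit N heights dx dy s v st) :
    Qb low_limit high_limit N heights dx dy s v
      (sweepCell low_limit high_limit N heights dx dy st x y) := by
  unfold sweepCell
  split
  · rename_i hr
    have := foldl_pres
      (fun st => Qb low_limit high_limit N heights dx dy s v st ∧ readV st.1 x y = true)
      (sweepDir low_limit high_limit N heights dx dy x y) (List.range 8)
      (fun st i hi hP => sweepDir_pres low_limit high_limit N heights dx dy s v x y i st
        (List.mem_range.mp hi) hxy hP.1 hP.2) st ⟨hq, hr⟩
    exact this.1
  · exact hq

lemma sweep_pres (low_limit high_limit N : Int) (heights : List (List Int)) (dx dy : List Int)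
    (s : Int × Int) (v : List (List Bool)) (hwf : WFV N v)
    (hsound : ∀ p, inbP N p → readV v p.1 p.2 = true →
      ReachP low_limit high_limit N heights dx dy s p) :
    Qb low_limit high_limit N heights dx dy s v (sweep low_limit high_limit N heights dx dy v) := by
  unfold sweep
  apply foldl_pres (Qb low_limit high_limit N heights dx dy s v)
  · intro st x hx hP
    unfold sweepRow
    apply foldl_pres (Qb low_limit high_limit N heights dx dy s v)
    · intro st y hy hP'
      have hx' := PySem.List.mem_pyRange_one.mp hx
      have hy' := PySem.List.mem_pyRange_one.mp hy
      exact sweepCell_pres low_limit high_limit N heights dx dy s v st x y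
        ⟨hx'.1, hx'.2, hy'.1, hy'.2⟩ hP'
    · exact hP
  · exact ⟨hwf, fun p _ h => h, hsound, le_refl _, by simp⟩

-- B's fixpoint loop: with enough fuel the result contains the input, is sound for ReachP,
-- and is closed under admissible moves
lemma bFix_spec (low_limit high_limit N : Int) (heights : List (List Int)) (dx dy : List Int)
    (s : Int × Int) :
    ∀ (f : Nat) (v : List (List Bool)), WFV N v →
      (∀ p, inbP N p → readV v p.1 p.2 = true →
        ReachP low_limit high_limit N heights dx dy s p) →
      N.toNat * N.toNat + 1 ≤ f + countT N v →
      (∀ p, inbP N p → readV v p.1 p.2 = true →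
        readV (bFix low_limit high_limit N heights dx dy f v) p.1 p.2 = true) ∧
      (∀ p, inbP N p → readV (bFix low_limit high_limit N heights dx dy f v) p.1 p.2 = true →
        ReachP low_limit high_limit N heights dx dy s p) ∧
      (∀ p, inbP N p → readV (bFix low_limit high_limit N heights dx dy f v) p.1 p.2 = true →
        ∀ p', AdjP low_limit high_limit N heights dx dy p p' →
          readV (bFix low_limit high_limit N heights dx dy f v) p'.1 p'.2 = true) := by
  intro f
  induction f with
  | zero =>
    intro v _ _ hfuel
    exfalso
    have := countT_le N v
    omega
  | succ f ih =>
    intro v hwf hsound hfuel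
    have hQ := sweep_pres low_limit high_limit N heights dx dy s v hwf hsound
    obtain ⟨hwf', hmono', hsound', hc1', hc2'⟩ := hQ
    simp only [bFix]
    by_cases hch : (sweep low_limit high_limit N heights dx dy v).2 = true
    · rw [if_pos hch]
      have hcount := hc2' hch
      obtain ⟨ihm, ihs, ihc⟩ := ih (sweep low_limit high_limit N heights dx dy v).1 hwf' hsound'
        (by omega)
      exact ⟨fun p hp hv => ihm p hp (hmono' p hp hv), ihs, ihc⟩
    · rw [if_neg hch]
      have hch' : (sweep low_limit high_limit N heights dx dy v).2 = false := by
        cases h : (sweep low_limit high_limit N heights dx dy v).2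
        · rfl
        · exact absurd h hch
      obtain ⟨heq, hclosed⟩ := sweep_stable low_limit high_limit N heights dx dy v hch'
      rw [heq]
      exact ⟨fun p _ h => h, hsound, hclosed⟩

lemma Reach_inb (low_limit high_limit N : Int) (heights : List (List Int)) (dx dy : List Int)
    (s p : Int × Int) (hs : inbP N s)
    (h : ReachP low_limit high_limit N heights dx dy s p) : inbP N p := by
  induction h with
  | base => exact hs
  | step _ hadj _ =>
    obtain ⟨i, _, rfl, hinb, _⟩ := hadj
    exact hinb

-- B's final matrix marks exactly the reachable cells
lemma bFix_char (low_limit high_limit N : Int) (heights : List (List Int)) (dx dy : List Int)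
    (sx sy : Int) (hs : inbP N (sx, sy)) :
    ∀ p, inbP N p →
      (readV (bFix low_limit high_limit N heights dx dy (N.toNat * N.toNat + 1)
        (setV (List.replicate N.toNat (List.replicate N.toNat false)) sx sy)) p.1 p.2 = true ↔
      ReachP low_limit high_limit N heights dx dy (sx, sy) p) := by
  obtain ⟨hm, hsnd, hcl⟩ := bFix_spec low_limit high_limit N heights dx dy (sx, sy)
    (N.toNat * N.toNat + 1)
    (setV (List.replicate N.toNat (List.replicate N.toNat false)) sx sy)
    (init_WFV N sx sy)
    (by
      intro p hp hv
      rw [readV_init N sx sy p hs hp] at hv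
      simp only [decide_eq_true_eq] at hv
      subst hv
      exact ReachP.base)
    (by omega)
  intro p hp
  constructor
  · exact hsnd p hp
  · intro hr
    induction hr with
    | base =>
      exact hm (sx, sy) hs (by rw [readV_init N sx sy (sx, sy) hs hs]; simp)
    | @step c q hr hadj ihp =>
      have hc : inbP N c := Reach_inb low_limit high_limit N heights dx dy (sx, sy) c hs hr
      exact hcl c hc (ihp hc) q hadj

lemma foldl_flatMap {α β σ : Type} (g : α → List β) (f : σ → β → σ) :
    ∀ (l : List α) (a : σ), (l.flatMap g).foldl f a = l.foldl (fun a x => (g x).foldl f a) a := by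
  intro l
  induction l with
  | nil => intro a; rfl
  | cons x l ih => intro a; rw [List.flatMap_cons, List.foldl_append, ih, List.foldl_cons]

lemma boardCells_eq (N : Int) : boardCells N =
    (List.range N.toNat).flatMap
      (fun (a : Nat) => (List.range N.toNat).map (fun (b : Nat) => ((a : Int), (b : Int)))) := by
  unfold boardCells
  show List.product _ _ = _
  unfold List.product
  simp only [List.flatMap_map, List.map_map]
  rfl

-- B's final counting pass sums the package indicator over the marked cells
lemma foldl_countK (grid : List (List String)) (reach : List (List Bool)) :
    ∀ (l : List (Int × Int)) (a : Int),
      l.foldl (fun acc p => if readV reach p.1 p.2 ∧ pyGet2 grid p.1 p.2 "" = "K" then acc + 1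
        else acc) a =
      a + kSum grid (l.filter (fun p => readV reach p.1 p.2)) := by
  intro l
  induction l with
  | nil => intro a; simp [kSum]
  | cons c l ih =>
    intro a
    rw [List.foldl_cons]
    by_cases hr : readV reach c.1 c.2
    · simp only [List.filter_cons]
      rw [if_pos hr, kSum_cons]
      by_cases hk : pyGet2 grid c.1 c.2 "" = "K"
      · rw [if_pos ⟨hr, hk⟩, ih]
        unfold kOf
        rw [if_pos hk]
        omega
      · rw [if_neg (fun h => hk h.2), ih]
        unfold kOf
        rw [if_neg hk]
        omega
    · simp only [List.filter_cons]
      rw [if_neg hr, if_neg (fun h => hr h.1), ih]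

lemma countK_eq (N : Int) (grid : List (List String)) (reach : List (List Bool)) :
    countK N grid reach =
      kSum grid ((boardCells N).filter (fun p => readV reach p.1 p.2)) := by
  have h1 : countK N grid reach = ((boardCells N).foldl
      (fun acc p => if readV reach p.1 p.2 ∧ pyGet2 grid p.1 p.2 "" = "K" then acc + 1 else acc)
      (0 : Int)) := by
    unfold countK
    rw [boardCells_eq, foldl_flatMap, PySem.List.pyRange_one]
    simp only [Int.sub_zero, List.foldl_map, zero_add]
  rw [h1, foldl_countK]
  omega

-- ===== VERDICT (by name: the statements are the Claim_ definitions above) =====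
theorem can_deliver_spec : Claim_unchanged_can_deliver := by
  intro start_x start_y low_limit high_limit n_packages N grid heights dx dy hdom hpre
  unfold Pre_can_deliver at hpre
  intro hnd
  rcases hpre with hpre | ⟨-, hnot⟩
  swap
  · unfold can_deliver can_deliver_alt
    rw [if_neg (by rw [pyGet2_eq_bind]; exact hnot),
      if_neg (by rw [pyGet2_eq_bind]; exact hnot)]
  obtain ⟨hx0, hxN, hy0, hyN, hHl, hHr, hGl, hGr, -⟩ := hpre
  unfold can_deliver can_deliver_alt
  by_cases hband : low_limit ≤ pyGet2 heights start_x start_y 0 ∧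
      pyGet2 heights start_x start_y 0 ≤ high_limit
  · rw [if_pos hband, if_pos hband]
    have hs : inbP N (start_x, start_y) := ⟨hx0, hxN, hy0, hyN⟩
    obtain ⟨hndP, hmemP⟩ := aPops_char low_limit high_limit N heights dx dy start_x start_y hs
    have hbchar := bFix_char low_limit high_limit N heights dx dy start_x start_y hs
    dsimp only
    rw [aLoop_char, countK_eq]
    have hperm : ((boardCells N).filter (fun p => readV
        (bFix low_limit high_limit N heights dx dy (N.toNat * N.toNat + 1)
          (setV (List.replicate N.toNat (List.replicate N.toNat false)) start_x start_y))
        p.1 p.2)).Perm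
        (aPops low_limit high_limit N heights dx dy (N.toNat * N.toNat + 1)
          [(start_x, start_y)]
          (setV (List.replicate N.toNat (List.replicate N.toNat false)) start_x start_y)) := by
      rw [List.perm_ext_iff_of_nodup ((nodup_boardCells N).filter _) hndP]
      intro p
      rw [List.mem_filter, mem_boardCells, hmemP]
      constructor
      · rintro ⟨hinb, hr⟩
        exact (hbchar p hinb).mp hr
      · intro hr
        have hinb := Reach_inb low_limit high_limit N heights dx dy (start_x, start_y) p hs hr
        exact ⟨hinb, (hbchar p hinb).mpr hr⟩
    rw [kSum_perm grid _ _ hperm]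
    simp only [firstK, zero_add]
    by_cases hk : pyGet2 grid start_x start_y "" = "K"
    · have hxh : start_x.toNat < heights.length := by omega
      have hyh : start_y.toNat < (heights[start_x.toNat]).length := by
        have := hHr _ (List.getElem_mem hxh); omega
      have hxg : start_x.toNat < grid.length := by omega
      have hyg : start_y.toNat < (grid[start_x.toNat]).length := by
        have := hGr _ (List.getElem_mem hxg); omega
      have hH := pyGet2_eq_getD heights start_x start_y 0 hx0 hxh hy0 hyh
      have hG := pyGet2_eq_getD grid start_x start_y "" hx0 hxg hy0 hyg
      have hn0 : n_packages ≠ 0 := by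
        intro hn
        exact hnd ⟨hn, ⟨hx0, hxN, hy0, hyN⟩, by rw [← hH]; exact hband, by rw [← hG]; exact hk⟩
      have hk1 : kOf grid (start_x, start_y) = 1 := by simp [kOf, hk]
      rw [hk1, Bool.eq_iff_iff]
      simp only [decide_eq_true_eq, Bool.and_eq_true]
      omega
    · have hk0 : kOf grid (start_x, start_y) = 0 := by simp [kOf, hk]
      rw [hk0, Bool.eq_iff_iff]
      simp only [decide_eq_true_eq, Bool.and_eq_true]
  · rw [if_neg hband, if_neg hband]

theorem can_deliver_changed : Claim_changed_can_deliver := by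
  unfold Claim_changed_can_deliver; decide

theorem can_deliver_tight : Claim_exact_can_deliver := by
  intro start_x start_y low_limit high_limit n_packages N grid heights dx dy hdom hpre hd
  unfold D_can_deliver at hd
  obtain ⟨hn0, ⟨hx0, hxN, hy0, hyN⟩, hband', hK'⟩ := hd
  unfold Pre_can_deliver at hpre
  rcases hpre with hpre | ⟨hsome, hnot⟩
  swap
  · -- the failing-band branch of Pre_ contradicts D_'s in-band start height
    exfalso
    have hsx : start_x = ((start_x.toNat : Nat) : Int) := (Int.toNat_of_nonneg hx0).symm
    have hsy : start_y = ((start_y.toNat : Nat) : Int) := (Int.toNat_of_nonneg hy0).symm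
    rw [hsx, hsy, PySem.List.pyGet?_natCast] at hnot hsome
    cases hm : heights[start_x.toNat]? with
    | none => rw [hm] at hsome; simp at hsome
    | some r =>
      rw [hm] at hsome hnot
      simp only [Option.bind_some] at hsome hnot
      rw [PySem.List.pyGet?_natCast] at hsome hnot
      cases hr : r[start_y.toNat]? with
      | none => rw [hr] at hsome; simp at hsome
      | some a =>
        rw [hr] at hnot
        simp only [Option.getD_some] at hnot
        obtain ⟨hmlt, hmeq⟩ := List.getElem?_eq_some_iff.mp hm
        obtain ⟨hrlt, hreq⟩ := List.getElem?_eq_some_iff.mp hr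
        rw [List.getD_eq_getElem heights [] hmlt, hmeq] at hband'
        rw [List.getD_eq_getElem r 0 hrlt, hreq] at hband'
        exact hnot hband'
  obtain ⟨-, -, -, -, hHl, hHr, hGl, hGr, -⟩ := hpre
  have hxh : start_x.toNat < heights.length := by omega
  have hyh : start_y.toNat < (heights[start_x.toNat]).length := by
    have := hHr _ (List.getElem_mem hxh); omega
  have hxg : start_x.toNat < grid.length := by omega
  have hyg : start_y.toNat < (grid[start_x.toNat]).length := by
    have := hGr _ (List.getElem_mem hxg); omega
  have hH := pyGet2_eq_getD heights start_x start_y 0 hx0 hxh hy0 hyh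
  have hG := pyGet2_eq_getD grid start_x start_y "" hx0 hxg hy0 hyg
  have hband : low_limit ≤ pyGet2 heights start_x start_y 0 ∧
      pyGet2 heights start_x start_y 0 ≤ high_limit := by rw [hH]; exact hband'
  have hK : pyGet2 grid start_x start_y "" = "K" := by rw [hG]; exact hK'
  unfold can_deliver can_deliver_alt
  rw [if_pos hband, if_pos hband]
  dsimp only
  rw [aLoop_char, countK_eq]
  have hk1 : kOf grid (start_x, start_y) = 1 := by simp [kOf, hK]
  have hnn := kSum_nonneg grid ((boardCells N).filter (fun p => readV
    (bFix low_limit high_limit N heights dx dy (N.toNat * N.toNat + 1)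
      (setV (List.replicate N.toNat (List.replicate N.toNat false)) start_x start_y)) p.1 p.2))
  subst hn0
  simp only [firstK, hk1, zero_add]
  intro heq
  rw [Bool.eq_iff_iff] at heq
  simp only [decide_eq_true_eq, Bool.and_eq_true] at heq
  omega
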